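-- pv_equiv track=rewrite | github.com/Young-Ho-Boss/parallel | 1.py | build_tau_masks
-- ===== SOURCE A (Python) =====
-- def build_tau_masks(D: int):
--     n = D*D
--     masks = {}
--     for k in range(D):  # k=0..D-1
--         m = [0]*n
--         for ell in range(k, n, D):  # ell % D == k
--             m[ell] = 1
--         masks[k] = m   # key는 k (shift는 d*k)
--     return masks
-- ===== SOURCE B (Python) =====
-- def build_tau_masks(D: int):
--     # per-cell indicator: position i of mask k is 1 exactly when i % D == k
--     return {k: [1 if i % D == k else 0 for i in range(D * D)] for k in range(D)}
-- ===== Notes on version B (the rewrite author's own statement) =====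
-- stated objective: simpler
-- what changed: A writes 1s into a zero-initialised list via an inner index-stepping loop over range(k, D*D, D) inside an explicit dict-building loop; B is a single dict comprehension whose value for k is the per-cell indicator comprehension [1 if i % D == k else 0 for i in range(D*D)] -- no mutation and no stepped inner loop.
import Mathlib
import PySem

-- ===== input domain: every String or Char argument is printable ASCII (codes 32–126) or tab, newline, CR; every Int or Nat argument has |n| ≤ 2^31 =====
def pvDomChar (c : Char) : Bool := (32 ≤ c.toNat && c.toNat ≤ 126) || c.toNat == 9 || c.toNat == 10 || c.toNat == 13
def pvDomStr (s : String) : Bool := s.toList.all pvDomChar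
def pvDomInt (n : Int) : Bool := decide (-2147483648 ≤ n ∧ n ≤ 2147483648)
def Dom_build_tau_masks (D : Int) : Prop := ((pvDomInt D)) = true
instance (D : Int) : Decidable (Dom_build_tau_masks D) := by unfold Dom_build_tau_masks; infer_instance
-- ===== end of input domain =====

-- B replaces A's inner index-stepping write loop by a per-cell indicator comprehension (i % D == k); objective: simpler.

-- ===== PORT A =====
-- masks[k] = m always inserts at a FRESH key k (k runs over distinct range values), so the dict
-- grows by appending (k, m) — exact under the dict-as-association-list convention.
def build_tau_masks (D : Int) : List (Int × List Int) :=
  let n := D * D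
  (PySem.List.pyRange 0 D 1).foldl
    (fun masks k =>
      let m := (PySem.List.pyRange k n D).foldl
        (fun m ell => m.set ell.toNat 1)          -- m[ell] = 1 (ell ≥ 0 and in range here)
        (List.replicate n.toNat 0)                -- [0]*n
      masks ++ [(k, m)])
    []

-- ===== PORT B =====
-- dict comprehension over the distinct keys k of range(D) = association list of the pairs in order;
-- each value is the per-cell comprehension [1 if i % D == k else 0 for i in range(D*D)].
def build_tau_masks_alt (D : Int) : List (Int × List Int) :=
  (PySem.List.pyRange 0 D 1).map (fun k =>
    (k, (PySem.List.pyRange 0 (D * D) 1).map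
          (fun i => if PySem.Int.mod i D == k then 1 else 0)))

-- ===== PRECONDITION & SPEC =====
def Spec_build_tau_masks (D : Int) (out : List (Int × List Int)) : Prop := out = build_tau_masks_alt D
instance (D : Int) (out : List (Int × List Int)) : Decidable (Spec_build_tau_masks D out) := by unfold Spec_build_tau_masks; infer_instance

-- ===== CLAIM (what is proved, stated in full; the proofs are below) =====
def Claim_equal_build_tau_masks : Prop := ∀ (D : Int), Dom_build_tau_masks D → Spec_build_tau_masks D (build_tau_masks D)

-- ===== LEMMAS AND PROOFS =====

theorem setFold_length (l : List Int) (m0 : List Int) :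
    (l.foldl (fun m e => m.set e.toNat 1) m0).length = m0.length := by
  induction l generalizing m0 with
  | nil => rfl
  | cons e t ih => simpa [List.foldl_cons] using ih (m0.set e.toNat 1)

theorem setFold_getElem? (l : List Int) (hl : ∀ e ∈ l, 0 ≤ e) (m0 : List Int) (i : Nat) :
    (l.foldl (fun m e => m.set e.toNat 1) m0)[i]? =
      if (i : Int) ∈ l ∧ i < m0.length then some 1 else m0[i]? := by
  induction l generalizing m0 with
  | nil => simp
  | cons e t ih =>
    have he : 0 ≤ e := hl e (by simp)
    have ht : ∀ x ∈ t, 0 ≤ x := fun x hx => hl x (by simp [hx])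
    rw [List.foldl_cons, ih ht]
    rw [List.getElem?_set]
    simp only [List.length_set, List.mem_cons]
    by_cases hilen : i < m0.length
    · by_cases hmem : (i : Int) ∈ t
      · simp [hmem, hilen]
      · by_cases hei : e.toNat = i
        · have hie : ((i : Int) = e) := by omega
          simp [hei, hilen, hie]
        · have hie : ¬((i : Int) = e) := by omega
          simp [hmem, hei, hilen, hie]
    · have hnone : m0[i]? = none := List.getElem?_eq_none (le_of_not_gt hilen)
      simp only [hilen, and_false, if_false, hnone]
      split_ifs <;> first | rfl | omega

theorem mask_eq (D k : Int) (hD : 0 < D) (hk0 : 0 ≤ k) (hkD : k < D) :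
    (PySem.List.pyRange k (D * D) D).foldl (fun m e => m.set e.toNat 1)
        (List.replicate (D * D).toNat (0 : Int))
      = (PySem.List.pyRange 0 (D * D) 1).map
          (fun i => if PySem.Int.mod i D == k then (1 : Int) else 0) := by
  have hn : (0 : Int) ≤ D * D := mul_nonneg hD.le hD.le
  have hcast : (((D * D).toNat : Int)) = D * D := Int.toNat_of_nonneg hn
  have hlen2 : ((PySem.List.pyRange 0 (D * D) 1).map
      (fun i => if PySem.Int.mod i D == k then (1 : Int) else 0)).length = (D * D).toNat := by
    simp [PySem.List.length_pyRange_one]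
  have hlen1 := setFold_length (PySem.List.pyRange k (D * D) D) (List.replicate (D * D).toNat (0 : Int))
  apply List.ext_getElem?
  intro i
  by_cases hi : i < (D * D).toNat
  · have hmemR : ∀ e ∈ PySem.List.pyRange k (D * D) D, (0 : Int) ≤ e := by
      intro e he
      have := (PySem.List.mem_pyRange_iff_of_pos hD e).1 he
      omega
    refine (setFold_getElem? (PySem.List.pyRange k (D * D) D) hmemR
      (List.replicate (D * D).toNat (0 : Int)) i).trans ?_
    rw [show (D * D) = (((D * D).toNat : Int)) from hcast.symm,
      PySem.List.getElem?_map_pyRange_zero _ _ _ hi]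
    rw [hcast]
    rw [List.getElem?_replicate]
    simp only [List.length_replicate, hi, if_true]
    have hmem := PySem.List.mem_pyRange_iff_of_pos (a := k) (b := D * D) hD (i : Int)
    rw [PySem.Int.mod_eq_emod_of_pos hD]
    by_cases hin : (i : Int) ∈ PySem.List.pyRange k (D * D) D
    · have h3 := hmem.1 hin
      obtain ⟨c, hc⟩ := h3.2.2
      have hik : (i : Int) = k + D * c := by omega
      have : (i : Int) % D = k := by
        rw [hik, Int.add_mul_emod_self_left]
        exact Int.emod_eq_of_lt hk0 hkD
      simp [hin, this]
    · have h3 : ¬ (k ≤ (i : Int) ∧ (i : Int) < D * D ∧ D ∣ (i : Int) - k) := fun h => hin (hmem.2 h)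
      have hi' : (i : Int) < D * D := by omega
      have : ¬ ((i : Int) % D = k) := by
        intro h
        have hq := Int.emod_add_mul_ediv (i : Int) D
        have hqnn : 0 ≤ (i : Int) / D := Int.ediv_nonneg (by omega) hD.le
        refine h3 ⟨by nlinarith [hq, h], hi', ⟨(i : Int) / D, by omega⟩⟩
      simp [hin, this]
  · have h1 : ((PySem.List.pyRange k (D * D) D).foldl (fun m e => m.set e.toNat 1)
        (List.replicate (D * D).toNat (0 : Int))).length ≤ i := by
      rw [hlen1]; simp; omega
    have h2 : ((PySem.List.pyRange 0 (D * D) 1).map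
        (fun i => if PySem.Int.mod i D == k then (1 : Int) else 0)).length ≤ i := by omega
    rw [List.getElem?_eq_none h1, List.getElem?_eq_none h2]

-- ===== VERDICT (by name: the statement is the Claim_ definition above) =====
theorem build_tau_masks_spec : Claim_equal_build_tau_masks := by
  intro D _
  unfold Spec_build_tau_masks build_tau_masks build_tau_masks_alt
  simp only []
  rw [PySem.List.foldl_append_singleton_eq_map
    (f := fun k => (k, (PySem.List.pyRange k (D * D) D).foldl
      (fun (m : List Int) (e : Int) => m.set e.toNat 1)
      (List.replicate (D * D).toNat (0 : Int))))]
  rw [List.nil_append]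
  by_cases hD : D ≤ 0
  case pos => rw [PySem.List.pyRange_one_eq_nil hD]; rfl
  case neg =>
    have hD' : 0 < D := by omega
    apply List.map_congr_left
    intro k hk
    have hkb := (PySem.List.mem_pyRange_one).1 hk
    exact congrArg (Prod.mk k) (mask_eq D k hD' hkb.1 hkb.2)
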